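-- pv_equiv track=rewrite | github.com/Wjerry5/LLMTM | LLMDyG_Motif/LLMDyG_Motif/utils/modif_judge_count.py | find_all_fragment_temporal_instances
-- ===== SOURCE A (Python) =====
-- def find_all_fragment_temporal_instances(map_frag_to_ctx, frag_events, ctx_times, time_window):
--     """
--     在动态图中寻找所有匹配给定fragment（缺失一条边的motif）的时序实例
--
--     参数:
--         map_frag_to_ctx: fragment节点到context节点的映射
--         frag_events: fragment中的事件序列 [(u_m, v_m, t_rel, orig_idx), ...]
--         ctx_times: context图中每条边的时间戳信息 {(u_c, v_c): [t1, t2, ...]}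
--         time_window: 时间窗口约束
--
--     返回:
--         所有匹配的时序实例列表
--     """
--     all_instances = []
--     num_frag_events = len(frag_events)
--
--     def find_recursive(frag_idx, current_detail):
--         # 递归终止：所有fragment事件都已匹配
--         if frag_idx == num_frag_events:
--             all_instances.append(list(current_detail))
--             return
--
--         # 获取当前fragment事件
--         u_m, v_m, t_rel, orig_idx = frag_events[frag_idx]
--         # 通过映射获取对应的context节点
--         u_c = map_frag_to_ctx.get(u_m)
--         v_c = map_frag_to_ctx.get(v_m)
--         if u_c is None or v_c is None:
--             return  # 映射无效，不应该发生
--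
--         # 获取context中对应边的所有时间戳
--         edge_topo = tuple(sorted((u_c, v_c)))
--         candidate_times = ctx_times.get(edge_topo, [])
--
--         # 获取时间约束：当前序列的最后时间和开始时间
--         last_t = current_detail[-1][3] if current_detail else -1
--         t_start = current_detail[0][3] if current_detail else None
--
--         # 尝试所有候选时间戳
--         for t_c in candidate_times:
--             # 检查时间顺序：当前时间必须晚于之前的时间
--             if t_c > last_t:
--                 # 检查时间窗口约束
--                 if t_start is None or time_window <= 0 or (t_c - t_start) <= time_window:
--                     current_detail.append((orig_idx, u_c, v_c, t_c))
--                     find_recursive(frag_idx + 1, current_detail)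
--                     current_detail.pop()  # 回溯
--
--     find_recursive(0, [])
--     return all_instances
-- ===== SOURCE B (Python) =====
-- def find_all_fragment_temporal_instances(map_frag_to_ctx, frag_events, ctx_times, time_window):
--     # Iterative level-by-level frontier expansion instead of recursion with backtracking.
--     partials = [[]]
--     for ev in frag_events:
--         if not partials:
--             break
--         u_m, v_m, t_rel, orig_idx = ev
--         u_c = map_frag_to_ctx.get(u_m)
--         v_c = map_frag_to_ctx.get(v_m)
--         if u_c is None or v_c is None:
--             partials = []
--             break
--         edge_topo = tuple(sorted((u_c, v_c)))
--         candidate_times = ctx_times.get(edge_topo, [])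
--         partials = [
--             p + [(orig_idx, u_c, v_c, t_c)]
--             for p in partials
--             for t_c in candidate_times
--             if t_c > (p[-1][3] if p else -1)
--             and (not p or time_window <= 0 or (t_c - p[0][3]) <= time_window)
--         ]
--     return [list(p) for p in partials]
-- ===== Notes on version B (the rewrite author's own statement) =====
-- stated objective: alternative
-- what changed: Replaces the recursive backtracking search (append/recurse/pop with a shared mutable partial) with an iterative level-by-level frontier expansion: a single loop over frag_events that rebuilds the list of partial instances per level with a comprehension, computing each level's edge lookup once.
-- outside the precondition, e.g. on find_all_fragment_temporal_instances({}, [(0, 0, 0, 0), (1,)], {}, 0): A returns [], B returns []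
import Mathlib
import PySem

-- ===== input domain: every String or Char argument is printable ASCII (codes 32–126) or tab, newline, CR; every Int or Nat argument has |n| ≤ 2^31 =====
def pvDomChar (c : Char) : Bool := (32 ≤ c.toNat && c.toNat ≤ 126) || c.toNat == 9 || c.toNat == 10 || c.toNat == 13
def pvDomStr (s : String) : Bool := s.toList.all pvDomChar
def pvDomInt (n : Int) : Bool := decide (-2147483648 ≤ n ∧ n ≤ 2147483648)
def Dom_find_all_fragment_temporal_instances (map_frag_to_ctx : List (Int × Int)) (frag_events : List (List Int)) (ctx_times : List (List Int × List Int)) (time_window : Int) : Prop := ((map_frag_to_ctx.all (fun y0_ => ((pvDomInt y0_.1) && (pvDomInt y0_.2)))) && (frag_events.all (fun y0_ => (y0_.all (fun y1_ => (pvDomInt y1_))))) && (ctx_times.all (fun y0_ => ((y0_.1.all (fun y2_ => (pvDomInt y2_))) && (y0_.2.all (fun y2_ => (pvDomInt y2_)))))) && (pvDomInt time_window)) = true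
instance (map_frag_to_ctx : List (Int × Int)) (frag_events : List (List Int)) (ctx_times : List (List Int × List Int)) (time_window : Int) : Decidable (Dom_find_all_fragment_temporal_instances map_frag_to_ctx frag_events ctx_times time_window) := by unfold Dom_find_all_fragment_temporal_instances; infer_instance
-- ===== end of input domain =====

-- B replaces A's recursive backtracking with iterative level-by-level frontier expansion (same values, same order; objective: alternative decomposition).

-- ===== PORT A =====
-- last_t = current_detail[-1][3] if current_detail else -1  (entries are the 4-lists the algorithm itself appends, so [3] is in range)
def pvLastT (p : List (List Int)) : Int :=
  match PySem.List.pyGet? p (-1) with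
  | some e => (PySem.List.pyGet? e 3).getD 0
  | none => -1

-- t_start = current_detail[0][3] if current_detail else None
def pvTStartA (p : List (List Int)) : Option Int :=
  match PySem.List.pyGet? p 0 with
  | some e => some ((PySem.List.pyGet? e 3).getD 0)
  | none => none

-- 't_start is None or time_window <= 0 or (t_c - t_start) <= time_window'
def pvWindowOkA (t_start : Option Int) (time_window t_c : Int) : Bool :=
  match t_start with
  | none => true
  | some ts => decide (time_window ≤ 0) || decide (t_c - ts ≤ time_window)

-- find_recursive: returns the instances it would append to all_instances, in order
def pvFindRec (map_frag_to_ctx : List (Int × Int)) (ctx_times : List (List Int × List Int)) (time_window : Int) : List (List Int) → List (List Int) → List (List (List Int))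
  | [], current_detail => [current_detail]
  | ev :: rest, current_detail =>
    match ev with
    | [u_m, v_m, _t_rel, orig_idx] =>
      match (PySem.Dict.mk map_frag_to_ctx).get? u_m, (PySem.Dict.mk map_frag_to_ctx).get? v_m with
      | some u_c, some v_c =>
        -- edge_topo = tuple(sorted((u_c, v_c)))
        let candidate_times := (PySem.Dict.mk ctx_times).getD (PySem.List.sorted [u_c, v_c] (fun x => x) false) []
        let last_t := pvLastT current_detail
        let t_start := pvTStartA current_detail
        candidate_times.foldl (fun acc t_c =>
          if decide (t_c > last_t) then
            if pvWindowOkA t_start time_window t_c then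
              acc ++ pvFindRec map_frag_to_ctx ctx_times time_window rest (current_detail ++ [[orig_idx, u_c, v_c, t_c]])
            else acc
          else acc) []
      | _, _ => []  -- u_c is None or v_c is None: return
    | _ => []  -- Python raises ValueError unpacking a non-4-tuple event; excluded by Pre_

def find_all_fragment_temporal_instances (map_frag_to_ctx : List (Int × Int)) (frag_events : List (List Int)) (ctx_times : List (List Int × List Int)) (time_window : Int) : List (List (List Int)) :=
  pvFindRec map_frag_to_ctx ctx_times time_window frag_events []

-- ===== PORT B =====
-- t_start as B reads it: p[0][3] (only evaluated when p is nonempty)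
def pvFirstT (p : List (List Int)) : Int :=
  (PySem.List.pyGet? ((PySem.List.pyGet? p 0).getD []) 3).getD 0

-- one level of frontier expansion (the body of Source B's for-loop over frag_events)
def pvStep (map_frag_to_ctx : List (Int × Int)) (ctx_times : List (List Int × List Int)) (time_window : Int) (partials : List (List (List Int))) (ev : List Int) : List (List (List Int)) :=
  if partials.isEmpty then partials  -- Source B's 'break': an empty frontier stays empty, later levels do nothing
  else match ev with
  | [u_m, v_m, _t_rel, orig_idx] =>
    match (PySem.Dict.mk map_frag_to_ctx).get? u_m, (PySem.Dict.mk map_frag_to_ctx).get? v_m with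
    | some u_c, some v_c =>
      let candidate_times := (PySem.Dict.mk ctx_times).getD (PySem.List.sorted [u_c, v_c] (fun x => x) false) []
      -- the list comprehension: outer over partials, inner over candidate_times with the combined guard
      partials.flatMap (fun p =>
        (candidate_times.filter (fun t_c =>
            decide (t_c > pvLastT p) &&
            (p.isEmpty || decide (time_window ≤ 0) || decide (t_c - pvFirstT p ≤ time_window)))).map
          (fun t_c => p ++ [[orig_idx, u_c, v_c, t_c]]))
    | _, _ => []  -- mapping invalid: 'partials = []; break'
  | _ => []  -- Source B raises ValueError here too; excluded by Pre_

def find_all_fragment_temporal_instances_alt (map_frag_to_ctx : List (Int × Int)) (frag_events : List (List Int)) (ctx_times : List (List Int × List Int)) (time_window : Int) : List (List (List Int)) :=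
  -- '[list(p) for p in partials]' is the identity under the type convention
  frag_events.foldl (pvStep map_frag_to_ctx ctx_times time_window) [[]]

-- ===== PRECONDITION & SPEC =====
-- Pre_ excludes frag_events containing an event that is not a 4-tuple: on those both Pythons raise ValueError while unpacking,
-- except when the malformed event sits at a level the search never reaches (the frontier died earlier), where both happen to return.
def Pre_find_all_fragment_temporal_instances (map_frag_to_ctx : List (Int × Int)) (frag_events : List (List Int)) (ctx_times : List (List Int × List Int)) (time_window : Int) : Prop :=
  frag_events.all (fun ev => ev.length == 4) = true
instance (map_frag_to_ctx : List (Int × Int)) (frag_events : List (List Int)) (ctx_times : List (List Int × List Int)) (time_window : Int) : Decidable (Pre_find_all_fragment_temporal_instances map_frag_to_ctx frag_events ctx_times time_window) := by unfold Pre_find_all_fragment_temporal_instances; infer_instance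

def pvWitness_find_all_fragment_temporal_instances : (List (Int × Int)) × List (List Int) × (List (List Int × List Int)) × Int :=
  ([(1, 2)], [[1, 1, 0, 5]], [([2, 2], [3, 4])], 0)

def Spec_find_all_fragment_temporal_instances (map_frag_to_ctx : List (Int × Int)) (frag_events : List (List Int)) (ctx_times : List (List Int × List Int)) (time_window : Int) (out : List (List (List Int))) : Prop := out = find_all_fragment_temporal_instances_alt map_frag_to_ctx frag_events ctx_times time_window
instance (map_frag_to_ctx : List (Int × Int)) (frag_events : List (List Int)) (ctx_times : List (List Int × List Int)) (time_window : Int) (out : List (List (List Int))) : Decidable (Spec_find_all_fragment_temporal_instances map_frag_to_ctx frag_events ctx_times time_window out) := by unfold Spec_find_all_fragment_temporal_instances; infer_instance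

-- ===== CLAIM (what is proved, stated in full; the proofs are below) =====
def Claim_equal_find_all_fragment_temporal_instances : Prop := ∀ (map_frag_to_ctx : List (Int × Int)) (frag_events : List (List Int)) (ctx_times : List (List Int × List Int)) (time_window : Int), Dom_find_all_fragment_temporal_instances map_frag_to_ctx frag_events ctx_times time_window → Pre_find_all_fragment_temporal_instances map_frag_to_ctx frag_events ctx_times time_window → Spec_find_all_fragment_temporal_instances map_frag_to_ctx frag_events ctx_times time_window (find_all_fragment_temporal_instances map_frag_to_ctx frag_events ctx_times time_window)

-- ===== LEMMAS AND PROOFS =====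

-- A's inner loop (nested if, appending a block each time) as filter-then-flatMap
theorem pv_foldl_if2_flatMap {β : Type} (l : List Int) (P Q : Int → Prop) [DecidablePred P] [DecidablePred Q] (g : Int → List β) :
    ∀ acc : List β, l.foldl (fun acc t => if P t then if Q t then acc ++ g t else acc else acc) acc
      = acc ++ (l.filter (fun t => decide (P t) && decide (Q t))).flatMap g := by
  induction l with
  | nil => intro acc; simp
  | cons x xs ih =>
    intro acc
    simp only [List.foldl_cons, List.filter_cons]
    by_cases hp : P x <;> by_cases hq : Q x <;> simp [hp, hq, ih, List.append_assoc]

-- A's two-step time test equals B's one comprehension guard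
theorem pv_cond_eq (tw : Int) (p : List (List Int)) (t : Int) :
    (decide (pvLastT p < t) && decide (pvWindowOkA (pvTStartA p) tw t = true))
      = (decide (pvLastT p < t) &&
          (p.isEmpty || decide (tw ≤ 0) || decide (t ≤ tw + pvFirstT p))) := by
  cases p with
  | nil => simp [pvTStartA, pvWindowOkA, PySem.List.pyGet?]
  | cons x xs =>
    simp only [pvTStartA, pvWindowOkA, pvFirstT, PySem.List.pyGet?_zero_cons, Option.getD_some,
      List.isEmpty_cons]
    by_cases h : pvLastT (x :: xs) < t <;> simp [h] <;> omega

-- frontier expansion = DFS: folding pvStep over the remaining events, from any frontier,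
-- yields each partial's DFS completions, concatenated in frontier order
theorem pv_frontier (m : List (Int × Int)) (ct : List (List Int × List Int)) (tw : Int) :
    ∀ (fe : List (List Int)) (ps : List (List (List Int))),
      fe.foldl (pvStep m ct tw) ps = ps.flatMap (fun p => pvFindRec m ct tw fe p) := by
  intro fe
  induction fe with
  | nil => intro ps; simp [pvFindRec]
  | cons ev rest ih =>
    intro ps
    rw [List.foldl_cons, ih]
    by_cases hps : ps = []
    · subst hps; simp [pvStep]
    · have hne : ps.isEmpty = false := by simpa [List.isEmpty_iff] using hps
      rcases ev with _ | ⟨u, _ | ⟨v, _ | ⟨tr, _ | ⟨oi, _ | ⟨z, zs⟩⟩⟩⟩⟩ <;>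
        simp only [pvStep, hne, Bool.false_eq_true, if_false] <;>
        try (simp [pvFindRec])
      -- remaining: the well-formed event [u, v, tr, oi]
      cases hu : (PySem.Dict.mk m).get? u <;> cases hv : (PySem.Dict.mk m).get? v <;>
        simp only [pvFindRec, hu, hv] <;> try (simp [pvFindRec, hu, hv])
      -- both lookups succeed
      rw [List.flatMap_assoc]
      refine List.flatMap_congr (fun p hp => ?_)
      rw [List.flatMap_map]
      symm
      rw [pv_foldl_if2_flatMap _ (fun t => pvLastT p < t) (fun t => pvWindowOkA (pvTStartA p) tw t = true)]
      rw [List.nil_append, List.filter_congr (fun t _ => pv_cond_eq tw p t)]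

-- ===== VERDICT (by name: the statement is the Claim_ definition above) =====
theorem find_all_fragment_temporal_instances_spec : Claim_equal_find_all_fragment_temporal_instances := by
  intro m fe ct tw _dom _pre
  unfold Spec_find_all_fragment_temporal_instances find_all_fragment_temporal_instances find_all_fragment_temporal_instances_alt
  rw [pv_frontier]
  simp
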